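-- pv_equiv track=rewrite | github.com/martydill/Wizardry-6-reverse-engineering | scratch/render_map0_walls_pygame.py | find_alignment_shift
-- ===== SOURCE A (Python) =====
-- def find_alignment_shift(added_edges):
--     # Known map0 additions from controlled edits.
--     target_h = {(0, 7), (0, 14), (16, 0), (17, 0), (18, 0), (19, 0), (16, 2), (17, 2), (18, 2), (19, 2)}
--     target_v = {(1, 7), (16, 0), (16, 1), (18, 0), (18, 1), (20, 0), (20, 1)}
--
--     best = (0, 0)
--     best_score = -10**9
--     for sx in range(-30, 31):
--         for sy in range(-30, 31):
--             hit = 0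
--             miss = 0
--             for kind, x, y in added_edges:
--                 tx = x + sx
--                 ty = y + sy
--                 if kind == "h":
--                     if (tx, ty) in target_h:
--                         hit += 1
--                     else:
--                         miss += 1
--                 else:
--                     if (tx, ty) in target_v:
--                         hit += 1
--                     else:
--                         miss += 1
--             score = hit * 10 - miss
--             if score > best_score:
--                 best_score = score
--                 best = (sx, sy)
--     return best, best_score
-- ===== SOURCE B (Python) =====
-- def find_alignment_shift(added_edges):
--     # Vote-based: each (edge, target) pair nominates the unique shift aligning them;
--     # the best shift is the most-voted one (lexicographically smallest on ties).
--     target_h = {(0, 7), (0, 14), (16, 0), (17, 0), (18, 0), (19, 0), (16, 2), (17, 2), (18, 2), (19, 2)}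
--     target_v = {(1, 7), (16, 0), (16, 1), (18, 0), (18, 1), (20, 0), (20, 1)}
--
--     votes = {}
--     for kind, x, y in added_edges:
--         targets = target_h if kind == "h" else target_v
--         for tx, ty in targets:
--             s = (tx - x, ty - y)
--             if -30 <= s[0] <= 30 and -30 <= s[1] <= 30:
--                 votes[s] = votes.get(s, 0) + 1
--
--     best = (-30, -30)
--     best_count = 0
--     for s, c in votes.items():
--         if c > best_count or (c == best_count and s < best):
--             best = s
--             best_count = c
--     return best, 11 * best_count - len(added_edges)
-- ===== Notes on version B (the rewrite author's own statement) =====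
-- stated objective: faster
-- what changed: Instead of scanning all 3721 candidate shifts and rescoring every edge for each (A), B makes one voting pass: each edge x target pair nominates the unique shift aligning them, tallied in a dict, and the most-voted in-range shift (lexicographically smallest on ties, (-30,-30) if none) wins; the score is recovered as 11*hits - len(edges).
import Mathlib
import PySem

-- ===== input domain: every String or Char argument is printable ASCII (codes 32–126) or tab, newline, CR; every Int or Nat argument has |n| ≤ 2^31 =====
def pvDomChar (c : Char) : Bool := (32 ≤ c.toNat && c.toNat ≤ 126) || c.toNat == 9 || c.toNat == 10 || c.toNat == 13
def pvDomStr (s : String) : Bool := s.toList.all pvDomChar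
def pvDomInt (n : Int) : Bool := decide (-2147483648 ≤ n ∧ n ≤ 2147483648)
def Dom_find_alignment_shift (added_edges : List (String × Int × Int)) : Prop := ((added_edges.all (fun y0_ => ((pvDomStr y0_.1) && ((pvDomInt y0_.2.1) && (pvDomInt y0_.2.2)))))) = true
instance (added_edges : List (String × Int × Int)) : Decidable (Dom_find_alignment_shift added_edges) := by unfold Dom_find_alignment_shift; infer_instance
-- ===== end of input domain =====

-- B replaces A's exhaustive scan of all 3721 shifts by one voting pass over edge×target
-- pairs (objective: faster; a timing run measured the speed-up).

-- ===== PORT A =====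
-- the two Python set literals (shared constants of both programs)
def targetH : PySem.Set (Int × Int) :=
  PySem.Set.ofList [(0, 7), (0, 14), (16, 0), (17, 0), (18, 0), (19, 0), (16, 2), (17, 2), (18, 2), (19, 2)]
def targetV : PySem.Set (Int × Int) :=
  PySem.Set.ofList [(1, 7), (16, 0), (16, 1), (18, 0), (18, 1), (20, 0), (20, 1)]

def find_alignment_shift (added_edges : List (String × Int × Int)) : (Int × Int) × Int :=
  -- best / best_score kept as one pair of loop state; the three nested Python loops are three nested folds
  let r :=
    (PySem.List.pyRange (-30) 31 1).foldl (fun st sx =>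
      (PySem.List.pyRange (-30) 31 1).foldl (fun st sy =>
        let hm := added_edges.foldl (fun (hm : Int × Int) e =>
          if e.1 = "h" then
            (if PySem.Set.contains targetH (e.2.1 + sx, e.2.2 + sy) then (hm.1 + 1, hm.2) else (hm.1, hm.2 + 1))
          else
            (if PySem.Set.contains targetV (e.2.1 + sx, e.2.2 + sy) then (hm.1 + 1, hm.2) else (hm.1, hm.2 + 1)))
          ((0 : Int), (0 : Int))
        let score := hm.1 * 10 - hm.2
        if score > st.2 then ((sx, sy), score) else st) st)
      (((0 : Int), (0 : Int)), (-1000000000 : Int))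
  r

-- ===== PORT B =====
def find_alignment_shift_alt (added_edges : List (String × Int × Int)) : (Int × Int) × Int :=
  let votes : PySem.Dict (Int × Int) Int :=
    added_edges.foldl (fun votes e =>
      (if e.1 = "h" then targetH else targetV).foldl (fun votes t =>
        let s := (t.1 - e.2.1, t.2 - e.2.2)
        if -30 ≤ s.1 ∧ s.1 ≤ 30 ∧ -30 ≤ s.2 ∧ s.2 ≤ 30 then
          votes.insert s (votes.getD s 0 + 1)
        else votes) votes)
      PySem.Dict.empty
  let bc :=
    votes.items.foldl (fun bc p =>
      if p.2 > bc.2 ∨ (p.2 = bc.2 ∧ (p.1.1 < bc.1.1 ∨ (p.1.1 = bc.1.1 ∧ p.1.2 < bc.1.2))) then p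
      else bc) (((-30 : Int), (-30 : Int)), (0 : Int))
  (bc.1, 11 * bc.2 - PySem.List.len added_edges)

-- ===== PRECONDITION & SPEC =====
-- Pre_ excludes only absurdly long inputs (at least 10^9 edges): there every shift's score can
-- sink to A's initial sentinel -10**9, which then leaks A's placeholder best (0, 0); B carries
-- no sentinel. On every list shorter than 10^9 the first scanned shift always beats the sentinel.
def Pre_find_alignment_shift (added_edges : List (String × Int × Int)) : Prop :=
  (added_edges.length : Int) < 1000000000
instance (added_edges : List (String × Int × Int)) : Decidable (Pre_find_alignment_shift added_edges) := by
  unfold Pre_find_alignment_shift; infer_instance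

def pvWitness_find_alignment_shift : (List (String × Int × Int)) := [("h", 0, 7)]

def Spec_find_alignment_shift (added_edges : List (String × Int × Int)) (out : (Int × Int) × Int) : Prop := out = find_alignment_shift_alt added_edges
instance (added_edges : List (String × Int × Int)) (out : (Int × Int) × Int) : Decidable (Spec_find_alignment_shift added_edges out) := by unfold Spec_find_alignment_shift; infer_instance

-- ===== CLAIM (what is proved, stated in full; the proofs are below) =====
def Claim_equal_find_alignment_shift : Prop := ∀ (added_edges : List (String × Int × Int)), Dom_find_alignment_shift added_edges → Pre_find_alignment_shift added_edges → Spec_find_alignment_shift added_edges (find_alignment_shift added_edges)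

-- ===== LEMMAS AND PROOFS =====

-- does edge e hit its target set under shift s?
def hitB (s : Int × Int) (e : String × Int × Int) : Bool :=
  if e.1 = "h" then PySem.Set.contains targetH (e.2.1 + s.1, e.2.2 + s.2)
  else PySem.Set.contains targetV (e.2.1 + s.1, e.2.2 + s.2)

def hitN (edges : List (String × Int × Int)) (s : Int × Int) : Nat := edges.countP (hitB s)
def missN (edges : List (String × Int × Int)) (s : Int × Int) : Nat := edges.countP (fun e => !hitB s e)
def score (edges : List (String × Int × Int)) (s : Int × Int) : Int :=
  (hitN edges s : Int) * 10 - (missN edges s : Int)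

-- "p is strictly preferable to q": higher score, or equal score and lexicographically smaller shift
def beatsB (p q : (Int × Int) × Int) : Bool :=
  decide (q.2 < p.2 ∨ (p.2 = q.2 ∧ (p.1.1 < q.1.1 ∨ (p.1.1 = q.1.1 ∧ p.1.2 < q.1.2))))

def selStep (st p : (Int × Int) × Int) : (Int × Int) × Int := if beatsB p st then p else st

def gStep (edges : List (String × Int × Int)) (st : (Int × Int) × Int) (q : Int × Int) : (Int × Int) × Int :=
  if score edges q > st.2 then (q, score edges q) else st

def S : List (Int × Int) :=
  (PySem.List.pyRange (-30) 31 1).flatMap (fun sx => (PySem.List.pyRange (-30) 31 1).map (fun sy => (sx, sy)))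

def lexLt (a b : Int × Int) : Prop := a.1 < b.1 ∨ (a.1 = b.1 ∧ a.2 < b.2)

def votesD (edges : List (String × Int × Int)) : PySem.Dict (Int × Int) Int :=
  edges.foldl (fun votes e =>
    (if e.1 = "h" then targetH else targetV).foldl (fun votes t =>
      let s := (t.1 - e.2.1, t.2 - e.2.2)
      if -30 ≤ s.1 ∧ s.1 ≤ 30 ∧ -30 ≤ s.2 ∧ s.2 ≤ 30 then
        votes.insert s (votes.getD s 0 + 1)
      else votes) votes)
    PySem.Dict.empty

-- ---- basic order facts ----
lemma beats_trans {x y z : (Int × Int) × Int} (h1 : beatsB x y = true) (h2 : beatsB y z = true) :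
    beatsB x z = true := by
  simp only [beatsB, decide_eq_true_eq] at *; omega

lemma nbeats_trans {x y z : (Int × Int) × Int} (h1 : beatsB y x = false) (h2 : beatsB z y = false) :
    beatsB z x = false := by
  simp only [beatsB, decide_eq_false_iff_not] at *; omega

lemma beats_total {x y : (Int × Int) × Int} (h1 : beatsB x y = false) (h2 : beatsB y x = false) :
    x = y := by
  obtain ⟨⟨a1, a2⟩, a3⟩ := x; obtain ⟨⟨b1, b2⟩, b3⟩ := y
  simp only [beatsB, decide_eq_false_iff_not] at *
  simp only [Prod.mk.injEq]
  omega

lemma beats_lower {k : Int × Int} {v v' : Int} {r : (Int × Int) × Int}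
    (h : beatsB (k, v) r = false) (hv : v' ≤ v) : beatsB (k, v') r = false := by
  simp only [beatsB, decide_eq_false_iff_not] at *
  omega

lemma beats_corner {v : Int} {r s' : (Int × Int) × Int}
    (h : beatsB (((-30 : Int), (-30 : Int)), v) r = false)
    (h1 : -30 ≤ s'.1.1) (h2 : -30 ≤ s'.1.2) (hv : s'.2 = v) : beatsB s' r = false := by
  simp only [beatsB, decide_eq_false_iff_not] at *
  omega

lemma beats_phi (n : Int) (p q : (Int × Int) × Int) :
    beatsB (p.1, 11 * p.2 - n) (q.1, 11 * q.2 - n) = beatsB p q := by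
  simp only [beatsB, decide_eq_decide]
  constructor <;> intro h <;> omega

-- ---- generic selection-fold characterisation ----
lemma sel_mem : ∀ (L : List ((Int × Int) × Int)) (st : (Int × Int) × Int),
    L.foldl selStep st ∈ st :: L := by
  intro L
  induction L with
  | nil => intro st; simp
  | cons p L ih =>
    intro st
    simp only [List.foldl_cons]
    rcases List.mem_cons.1 (ih (selStep st p)) with h | h
    · rw [h]
      by_cases hb : beatsB p st = true
      · simp [selStep, hb]
      · simp [selStep, hb]
    · exact List.mem_cons_of_mem _ (List.mem_cons_of_mem _ h)

lemma sel_ge : ∀ (L : List ((Int × Int) × Int)) (st : (Int × Int) × Int),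
    ∀ x ∈ st :: L, beatsB x (L.foldl selStep st) = false := by
  intro L
  induction L with
  | nil =>
    intro st x hx
    simp at hx; subst hx
    simp [beatsB]
  | cons p L ih =>
    intro st x hx
    simp only [List.foldl_cons]
    by_cases hb : beatsB p st = true
    · have hst' : selStep st p = p := by simp [selStep, hb]
      rw [hst']
      rcases List.mem_cons.1 hx with hxe | hx'
      · rw [hxe]
        have hpr := ih p p (by simp)
        cases hxr : beatsB st (L.foldl selStep p) with
        | false => rfl
        | true => exact absurd (beats_trans hb hxr) (by simp [hpr])
      · exact ih p x hx'
    · have hbf : beatsB p st = false := by simpa using hb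
      have hst' : selStep st p = st := by simp [selStep, hbf]
      rw [hst']
      rcases List.mem_cons.1 hx with hxe | hx'
      · exact hxe ▸ ih st st (by simp)
      · rcases List.mem_cons.1 hx' with hxe | hx''
        · exact hxe ▸ nbeats_trans (ih st st (by simp)) hbf
        · exact ih st x (by right; exact hx'')

-- ---- A-side: characterisation of the shift-scan fold ----
lemma g_mem (edges : List (String × Int × Int)) :
    ∀ (L : List (Int × Int)) (st : (Int × Int) × Int),
      L.foldl (gStep edges) st ∈ st :: L.map (fun s => (s, score edges s)) := by
  intro L
  induction L with
  | nil => intro st; simp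
  | cons s L ih =>
    intro st
    simp only [List.foldl_cons, List.map_cons]
    rcases List.mem_cons.1 (ih (gStep edges st s)) with h | h
    · rw [h]
      by_cases hs : score edges s > st.2
      · simp [gStep, hs]
      · simp [gStep, hs]
    · exact List.mem_cons_of_mem _ (List.mem_cons_of_mem _ h)

lemma g_ge (edges : List (String × Int × Int)) :
    ∀ (L : List (Int × Int)) (st : (Int × Int) × Int),
      L.Pairwise lexLt →
      (∀ s ∈ L, ¬(score edges s = st.2 ∧ lexLt s st.1)) →
      ∀ x ∈ st :: L.map (fun s => (s, score edges s)),
        beatsB x (L.foldl (gStep edges) st) = false := by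
  intro L
  induction L with
  | nil =>
    intro st _ _ x hx
    simp at hx; subst hx
    simp [beatsB]
  | cons s L ih =>
    intro st hpw hH x hx
    simp only [List.foldl_cons]
    have hpw' := (List.pairwise_cons.1 hpw).2
    have hhead := (List.pairwise_cons.1 hpw).1
    by_cases hs : score edges s > st.2
    · have hst' : gStep edges st s = (s, score edges s) := by simp [gStep, hs]
      rw [hst']
      have hH' : ∀ s' ∈ L, ¬(score edges s' = score edges s ∧ lexLt s' s) := by
        intro s' hs' hcon
        obtain ⟨h1, hlt⟩ := hcon
        have h2 := hhead s' hs'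
        unfold lexLt at hlt h2
        omega
      rcases List.mem_cons.1 hx with hxe | hx'
      · -- x = st
        rw [hxe]
        have hbeat : beatsB (s, score edges s) st = true := by
          simp only [beatsB, decide_eq_true_eq]; left; exact hs
        have hres := ih (s, score edges s) hpw' hH' (s, score edges s) (by simp)
        cases hxr : beatsB st (L.foldl (gStep edges) (s, score edges s)) with
        | false => rfl
        | true => exact absurd (beats_trans hbeat hxr) (by simp [hres])
      · rcases List.mem_cons.1 hx' with hxe | hx''
        · exact hxe ▸ ih (s, score edges s) hpw' hH' _ (by simp)
        · exact ih (s, score edges s) hpw' hH' x (by right; exact hx'')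
    · have hst' : gStep edges st s = st := by simp [gStep, hs]
      rw [hst']
      have hH' : ∀ s' ∈ L, ¬(score edges s' = st.2 ∧ lexLt s' st.1) := by
        intro s' hs'; exact hH s' (by simp [hs'])
      rcases List.mem_cons.1 hx with hxe | hx'
      · exact hxe ▸ ih st hpw' hH' st (by simp)
      · rcases List.mem_cons.1 hx' with hxe | hx''
        · -- x = (s, score s)
          have h1 : beatsB (s, score edges s) st = false := by
            refine decide_eq_false ?_
            show ¬(st.2 < score edges s ∨ (score edges s = st.2 ∧ (s.1 < st.1.1 ∨ (s.1 = st.1.1 ∧ s.2 < st.1.2))))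
            have h2 := hH s (by simp)
            unfold lexLt at h2
            intro hcon
            apply h2
            constructor
            · omega
            · omega
          exact hxe ▸ nbeats_trans (ih st hpw' hH' st (by simp)) h1
        · exact ih st hpw' hH' x (by right; exact hx'')

-- ---- S facts ----
lemma mem_S (q : Int × Int) : q ∈ S ↔ (-30 ≤ q.1 ∧ q.1 ≤ 30 ∧ -30 ≤ q.2 ∧ q.2 ≤ 30) := by
  obtain ⟨a, b⟩ := q
  simp only [S, List.mem_flatMap, List.mem_map, PySem.List.mem_pyRange_one, Prod.mk.injEq]
  constructor
  · rintro ⟨sx, hsx, sy, hsy, rfl, rfl⟩; omega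
  · rintro ⟨h1, h2, h3, h4⟩; exact ⟨a, by omega, b, by omega, rfl, rfl⟩

lemma pairwise_S : S.Pairwise lexLt := by
  have hR : (PySem.List.pyRange (-30) 31 1).Pairwise (· < ·) := PySem.List.pairwise_lt_pyRange_one _ _
  refine List.pairwise_flatMap.2 ⟨?_, ?_⟩
  · intro sx _
    rw [List.pairwise_map]
    exact hR.imp (fun h => Or.inr ⟨rfl, h⟩)
  · refine hR.imp ?_
    intro a b hab x hx y hy
    simp only [List.mem_map] at hx hy
    obtain ⟨_, _, rfl⟩ := hx
    obtain ⟨_, _, rfl⟩ := hy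
    exact Or.inl hab

-- ---- counting facts ----
lemma hit_add_miss (edges : List (String × Int × Int)) (s : Int × Int) :
    hitN edges s + missN edges s = edges.length := by
  unfold hitN missN
  induction edges with
  | nil => simp
  | cons e es ih =>
    simp only [List.countP_cons, List.length_cons]
    cases hitB s e <;> simp <;> omega

lemma score_eq (edges : List (String × Int × Int)) (s : Int × Int) :
    score edges s = 11 * (hitN edges s : Int) - (edges.length : Int) := by
  have := hit_add_miss edges s
  unfold score
  omega

lemma score_ge (edges : List (String × Int × Int)) (s : Int × Int) :
    -(edges.length : Int) ≤ score edges s := by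
  rw [score_eq]
  have : (0 : Int) ≤ (hitN edges s : Int) := Int.natCast_nonneg _
  omega

-- ---- A port characterisation ----
lemma nested_general {σ : Type} (G : σ → Int → Int → σ) (R1 R2 : List Int) :
    ∀ (st : σ),
      R1.foldl (fun st sx => R2.foldl (fun st sy => G st sx sy) st) st
      = (R1.flatMap fun sx => R2.map fun sy => (sx, sy)).foldl (fun st q => G st q.1 q.2) st := by
  induction R1 with
  | nil => intro st; simp
  | cons sx R1 ih =>
    intro st
    simp only [List.foldl_cons, List.flatMap_cons, List.foldl_append, List.foldl_map]
    exact ih _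

lemma hm_fold (edges : List (String × Int × Int)) (sx sy : Int) :
    ∀ (h m : Int),
      edges.foldl (fun (hm : Int × Int) e =>
        if e.1 = "h" then
          (if PySem.Set.contains targetH (e.2.1 + sx, e.2.2 + sy) then (hm.1 + 1, hm.2) else (hm.1, hm.2 + 1))
        else
          (if PySem.Set.contains targetV (e.2.1 + sx, e.2.2 + sy) then (hm.1 + 1, hm.2) else (hm.1, hm.2 + 1))) (h, m)
      = (h + (hitN edges (sx, sy) : Int), m + (missN edges (sx, sy) : Int)) := by
  have hfun : (fun (hm : Int × Int) (e : String × Int × Int) =>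
        if e.1 = "h" then
          (if PySem.Set.contains targetH (e.2.1 + sx, e.2.2 + sy) then (hm.1 + 1, hm.2) else (hm.1, hm.2 + 1))
        else
          (if PySem.Set.contains targetV (e.2.1 + sx, e.2.2 + sy) then (hm.1 + 1, hm.2) else (hm.1, hm.2 + 1)))
      = (fun (hm : Int × Int) (e : String × Int × Int) =>
        if hitB (sx, sy) e then (hm.1 + 1, hm.2) else (hm.1, hm.2 + 1)) := by
    funext hm e
    unfold hitB
    by_cases hk : e.1 = "h" <;> simp [hk]
  have hfun2 : (fun (hm : Int × Int) (e : String × Int × Int) =>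
        if hitB (sx, sy) e then (hm.1 + 1, hm.2) else (hm.1, hm.2 + 1))
      = (fun (hm : Int × Int) (e : String × Int × Int) =>
        ((if hitB (sx, sy) e then hm.1 + 1 else hm.1), (if !hitB (sx, sy) e then hm.2 + 1 else hm.2))) := by
    funext hm e
    cases hitB (sx, sy) e <;> simp
  intro h m
  rw [hfun, hfun2]
  rw [PySem.List.foldl_prod_mk (f := fun (a : Int) (e : String × Int × Int) => if hitB (sx, sy) e then a + 1 else a)
    (g := fun (a : Int) (e : String × Int × Int) => if !hitB (sx, sy) e then a + 1 else a)]
  rw [PySem.List.foldl_if_add_one, PySem.List.foldl_if_add_one]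
  rfl

lemma portA_char (edges : List (String × Int × Int)) :
    find_alignment_shift edges = S.foldl (gStep edges) (((0 : Int), (0 : Int)), (-1000000000 : Int)) := by
  have h0 : find_alignment_shift edges
      = (PySem.List.pyRange (-30) 31 1).foldl (fun st sx =>
          (PySem.List.pyRange (-30) 31 1).foldl (fun st sy =>
            let hm := edges.foldl (fun (hm : Int × Int) e =>
              if e.1 = "h" then
                (if PySem.Set.contains targetH (e.2.1 + sx, e.2.2 + sy) then (hm.1 + 1, hm.2) else (hm.1, hm.2 + 1))
              else
                (if PySem.Set.contains targetV (e.2.1 + sx, e.2.2 + sy) then (hm.1 + 1, hm.2) else (hm.1, hm.2 + 1)))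
              ((0 : Int), (0 : Int))
            let score := hm.1 * 10 - hm.2
            if score > st.2 then ((sx, sy), score) else st) st)
          (((0 : Int), (0 : Int)), (-1000000000 : Int)) := rfl
  rw [h0, nested_general]
  rw [show ((PySem.List.pyRange (-30) 31 1).flatMap fun sx => (PySem.List.pyRange (-30) 31 1).map fun sy => (sx, sy)) = S from rfl]
  refine PySem.List.foldl_congr_mem _ _ _ _ ?_
  intro acc q _
  show (let hm := edges.foldl (fun (hm : Int × Int) e =>
          if e.1 = "h" then
            (if PySem.Set.contains targetH (e.2.1 + q.1, e.2.2 + q.2) then (hm.1 + 1, hm.2) else (hm.1, hm.2 + 1))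
          else
            (if PySem.Set.contains targetV (e.2.1 + q.1, e.2.2 + q.2) then (hm.1 + 1, hm.2) else (hm.1, hm.2 + 1)))
          ((0 : Int), (0 : Int))
        let score := hm.1 * 10 - hm.2
        if score > acc.2 then ((q.1, q.2), score) else acc) = gStep edges acc q
  rw [hm_fold edges q.1 q.2 0 0]
  simp only [zero_add, gStep, score, Prod.mk.eta]

-- ---- B side: the votes dict ----
lemma inner_getD (x y : Int) (s : Int × Int)
    (hs : -30 ≤ s.1 ∧ s.1 ≤ 30 ∧ -30 ≤ s.2 ∧ s.2 ≤ 30) :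
    ∀ (ts : List (Int × Int)) (d : PySem.Dict (Int × Int) Int),
      (ts.foldl (fun votes t =>
        let sh := (t.1 - x, t.2 - y)
        if -30 ≤ sh.1 ∧ sh.1 ≤ 30 ∧ -30 ≤ sh.2 ∧ sh.2 ≤ 30 then
          votes.insert sh (votes.getD sh 0 + 1)
        else votes) d).getD s 0
      = d.getD s 0 + (ts.count (x + s.1, y + s.2) : Int) := by
  intro ts
  induction ts with
  | nil => intro d; simp
  | cons t ts ih =>
    intro d
    simp only [List.foldl_cons, List.count_cons]
    by_cases hin : -30 ≤ t.1 - x ∧ t.1 - x ≤ 30 ∧ -30 ≤ t.2 - y ∧ t.2 - y ≤ 30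
    · rw [if_pos hin, ih]
      rw [PySem.Dict.getD_insert]
      by_cases hts : t = (x + s.1, y + s.2)
      · have hseq : s = (t.1 - x, t.2 - y) := by
          obtain ⟨a, b⟩ := s
          rw [hts]
          simp
        rw [if_pos hseq, ← hseq]
        simp [hts]
        ring
      · have hsne : ¬(s = (t.1 - x, t.2 - y)) := by
          intro hcon
          apply hts
          obtain ⟨a, b⟩ := s
          obtain ⟨c, d'⟩ := t
          simp only [Prod.mk.injEq] at hcon ⊢
          omega
        rw [if_neg hsne]
        have : (t == (x + s.1, y + s.2)) = false := by
          simp only [beq_eq_false_iff_ne, ne_eq]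
          exact hts
        simp [this]
    · rw [if_neg hin, ih]
      have hts : ¬(t = (x + s.1, y + s.2)) := by
        intro hcon
        apply hin
        obtain ⟨a, b⟩ := s
        rw [hcon]
        dsimp only at hs ⊢
        constructor
        · omega
        constructor
        · omega
        constructor
        · omega
        · omega
      have : (t == (x + s.1, y + s.2)) = false := by
        simp only [beq_eq_false_iff_ne, ne_eq]
        exact hts
      simp [this]

lemma nodup_targetH : (targetH : List (Int × Int)).Nodup := by decide
lemma nodup_targetV : (targetV : List (Int × Int)).Nodup := by decide

lemma count_target (e : String × Int × Int) (s : Int × Int) :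
    (((if e.1 = "h" then targetH else targetV) : List (Int × Int)).count (e.2.1 + s.1, e.2.2 + s.2) : Int)
      = if hitB s e then 1 else 0 := by
  by_cases hk : e.1 = "h" <;>
    simp only [hitB, hk, if_true, if_false]
  · cases hc : PySem.Set.contains targetH (e.2.1 + s.1, e.2.2 + s.2) with
    | true =>
      have hm : (e.2.1 + s.1, e.2.2 + s.2) ∈ (targetH : List (Int × Int)) := (PySem.Set.contains_iff _ _).1 hc
      rw [List.count_eq_one_of_mem nodup_targetH hm]
      simp
    | false =>
      have hm : (e.2.1 + s.1, e.2.2 + s.2) ∉ (targetH : List (Int × Int)) := by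
        intro hcon
        rw [(PySem.Set.contains_iff _ _).2 hcon] at hc
        exact Bool.true_eq_false.mp hc
      rw [List.count_eq_zero.2 hm]
      simp
  · cases hc : PySem.Set.contains targetV (e.2.1 + s.1, e.2.2 + s.2) with
    | true =>
      have hm : (e.2.1 + s.1, e.2.2 + s.2) ∈ (targetV : List (Int × Int)) := (PySem.Set.contains_iff _ _).1 hc
      rw [List.count_eq_one_of_mem nodup_targetV hm]
      simp
    | false =>
      have hm : (e.2.1 + s.1, e.2.2 + s.2) ∉ (targetV : List (Int × Int)) := by
        intro hcon
        rw [(PySem.Set.contains_iff _ _).2 hcon] at hc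
        exact Bool.true_eq_false.mp hc
      rw [List.count_eq_zero.2 hm]
      simp

lemma votes_getD_gen (s : Int × Int)
    (hs : -30 ≤ s.1 ∧ s.1 ≤ 30 ∧ -30 ≤ s.2 ∧ s.2 ≤ 30) :
    ∀ (edges : List (String × Int × Int)) (d : PySem.Dict (Int × Int) Int),
      (edges.foldl (fun votes e =>
        (if e.1 = "h" then targetH else targetV).foldl (fun votes t =>
          let sh := (t.1 - e.2.1, t.2 - e.2.2)
          if -30 ≤ sh.1 ∧ sh.1 ≤ 30 ∧ -30 ≤ sh.2 ∧ sh.2 ≤ 30 then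
            votes.insert sh (votes.getD sh 0 + 1)
          else votes) votes) d).getD s 0
      = d.getD s 0 + (hitN edges s : Int) := by
  intro edges
  induction edges with
  | nil => intro d; simp [hitN]
  | cons e es ih =>
    intro d
    simp only [List.foldl_cons]
    rw [ih, inner_getD e.2.1 e.2.2 s hs, count_target e s]
    simp only [hitN, List.countP_cons]
    cases hitB s e <;> first | (simp; ring) | simp

lemma votes_getD (edges : List (String × Int × Int)) (s : Int × Int)
    (hs : -30 ≤ s.1 ∧ s.1 ≤ 30 ∧ -30 ≤ s.2 ∧ s.2 ≤ 30) :
    (votesD edges).getD s 0 = (hitN edges s : Int) := by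
  unfold votesD
  rw [votes_getD_gen s hs edges PySem.Dict.empty]
  simp

lemma inner_keys (x y : Int) :
    ∀ (ts : List (Int × Int)) (d : PySem.Dict (Int × Int) Int) (k : Int × Int),
      k ∈ (ts.foldl (fun votes t =>
        let sh := (t.1 - x, t.2 - y)
        if -30 ≤ sh.1 ∧ sh.1 ≤ 30 ∧ -30 ≤ sh.2 ∧ sh.2 ≤ 30 then
          votes.insert sh (votes.getD sh 0 + 1)
        else votes) d).keys →
      k ∈ d.keys ∨ (-30 ≤ k.1 ∧ k.1 ≤ 30 ∧ -30 ≤ k.2 ∧ k.2 ≤ 30) := by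
  intro ts
  induction ts with
  | nil => intro d k hk; exact Or.inl hk
  | cons t ts ih =>
    intro d k hk
    simp only [List.foldl_cons] at hk
    by_cases hin : -30 ≤ t.1 - x ∧ t.1 - x ≤ 30 ∧ -30 ≤ t.2 - y ∧ t.2 - y ≤ 30
    · rw [if_pos hin] at hk
      rcases ih _ k hk with h | h
      · rcases (PySem.Dict.mem_keys_insert _ _ _ _).1 h with h' | h'
        · right; rw [h']; dsimp only; exact hin
        · exact Or.inl h'
      · exact Or.inr h
    · rw [if_neg hin] at hk
      exact ih _ k hk

lemma inner_nodup (x y : Int) :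
    ∀ (ts : List (Int × Int)) (d : PySem.Dict (Int × Int) Int),
      d.keys.Nodup →
      (ts.foldl (fun votes t =>
        let sh := (t.1 - x, t.2 - y)
        if -30 ≤ sh.1 ∧ sh.1 ≤ 30 ∧ -30 ≤ sh.2 ∧ sh.2 ≤ 30 then
          votes.insert sh (votes.getD sh 0 + 1)
        else votes) d).keys.Nodup := by
  intro ts
  induction ts with
  | nil => intro d hd; exact hd
  | cons t ts ih =>
    intro d hd
    simp only [List.foldl_cons]
    by_cases hin : -30 ≤ t.1 - x ∧ t.1 - x ≤ 30 ∧ -30 ≤ t.2 - y ∧ t.2 - y ≤ 30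
    · rw [if_pos hin]
      exact ih _ (PySem.Dict.nodup_keys_insert _ _ _ hd)
    · rw [if_neg hin]
      exact ih _ hd

lemma votes_keys_range (edges : List (String × Int × Int)) :
    ∀ k ∈ (votesD edges).keys, (-30 ≤ k.1 ∧ k.1 ≤ 30 ∧ -30 ≤ k.2 ∧ k.2 ≤ 30) := by
  unfold votesD
  suffices h : ∀ (edges : List (String × Int × Int)) (d : PySem.Dict (Int × Int) Int),
      (∀ k ∈ d.keys, (-30 ≤ k.1 ∧ k.1 ≤ 30 ∧ -30 ≤ k.2 ∧ k.2 ≤ 30)) →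
      ∀ k ∈ (edges.foldl (fun votes e =>
        (if e.1 = "h" then targetH else targetV).foldl (fun votes t =>
          let sh := (t.1 - e.2.1, t.2 - e.2.2)
          if -30 ≤ sh.1 ∧ sh.1 ≤ 30 ∧ -30 ≤ sh.2 ∧ sh.2 ≤ 30 then
            votes.insert sh (votes.getD sh 0 + 1)
          else votes) votes) d).keys, (-30 ≤ k.1 ∧ k.1 ≤ 30 ∧ -30 ≤ k.2 ∧ k.2 ≤ 30) by
    intro k hk
    exact h edges PySem.Dict.empty (by simp) k hk
  intro edges
  induction edges with
  | nil => intro d hd; exact hd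
  | cons e es ih =>
    intro d hd
    simp only [List.foldl_cons]
    refine ih _ ?_
    intro k hk
    rcases inner_keys e.2.1 e.2.2 _ d k hk with h | h
    · exact hd k h
    · exact h

lemma votes_nodup (edges : List (String × Int × Int)) : (votesD edges).keys.Nodup := by
  unfold votesD
  suffices h : ∀ (edges : List (String × Int × Int)) (d : PySem.Dict (Int × Int) Int),
      d.keys.Nodup →
      (edges.foldl (fun votes e =>
        (if e.1 = "h" then targetH else targetV).foldl (fun votes t =>
          let sh := (t.1 - e.2.1, t.2 - e.2.2)
          if -30 ≤ sh.1 ∧ sh.1 ≤ 30 ∧ -30 ≤ sh.2 ∧ sh.2 ≤ 30 then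
            votes.insert sh (votes.getD sh 0 + 1)
          else votes) votes) d).keys.Nodup by
    exact h edges PySem.Dict.empty (by simp)
  intro edges
  induction edges with
  | nil => intro d hd; exact hd
  | cons e es ih =>
    intro d hd
    simp only [List.foldl_cons]
    exact ih _ (inner_nodup e.2.1 e.2.2 _ d hd)

lemma portB_char (edges : List (String × Int × Int)) :
    find_alignment_shift_alt edges =
      (((votesD edges).items.foldl selStep (((-30 : Int), (-30 : Int)), (0 : Int))).1,
        11 * ((votesD edges).items.foldl selStep (((-30 : Int), (-30 : Int)), (0 : Int))).2 - (edges.length : Int)) := by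
  have hsel : ∀ (items : List ((Int × Int) × Int)),
      items.foldl (fun bc p =>
        if p.2 > bc.2 ∨ (p.2 = bc.2 ∧ (p.1.1 < bc.1.1 ∨ (p.1.1 = bc.1.1 ∧ p.1.2 < bc.1.2))) then p
        else bc) (((-30 : Int), (-30 : Int)), (0 : Int))
      = items.foldl selStep (((-30 : Int), (-30 : Int)), (0 : Int)) := by
    intro items
    refine PySem.List.foldl_congr_mem _ _ _ _ ?_
    intro acc p _
    by_cases h : (p.2 > acc.2 ∨ (p.2 = acc.2 ∧ (p.1.1 < acc.1.1 ∨ (p.1.1 = acc.1.1 ∧ p.1.2 < acc.1.2))))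
    · rw [if_pos h]
      have hb : beatsB p acc = true := by
        simp only [beatsB, decide_eq_true_eq]
        exact h
      simp [selStep, hb]
    · rw [if_neg h]
      have hb : beatsB p acc = false := by
        simp only [beatsB]
        exact decide_eq_false h
      simp [selStep, hb]
  have h0 : find_alignment_shift_alt edges
      = (((votesD edges).items.foldl (fun bc p =>
            if p.2 > bc.2 ∨ (p.2 = bc.2 ∧ (p.1.1 < bc.1.1 ∨ (p.1.1 = bc.1.1 ∧ p.1.2 < bc.1.2))) then p
            else bc) (((-30 : Int), (-30 : Int)), (0 : Int))).1,
          11 * ((votesD edges).items.foldl (fun bc p =>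
            if p.2 > bc.2 ∨ (p.2 = bc.2 ∧ (p.1.1 < bc.1.1 ∨ (p.1.1 = bc.1.1 ∧ p.1.2 < bc.1.2))) then p
            else bc) (((-30 : Int), (-30 : Int)), (0 : Int))).2 - PySem.List.len edges) := rfl
  rw [h0, hsel]
  simp only [PySem.List.len_eq]

-- ===== VERDICT (by name: the statement is the Claim_ definition above) =====
theorem find_alignment_shift_spec : Claim_equal_find_alignment_shift := by
  intro edges _ hpre
  unfold Spec_find_alignment_shift
  unfold Pre_find_alignment_shift at hpre
  -- A's result
  set init : (Int × Int) × Int := (((0 : Int), (0 : Int)), (-1000000000 : Int)) with hinit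
  set rA : (Int × Int) × Int := S.foldl (gStep edges) init with hrA
  have hAH : ∀ s ∈ S, ¬(score edges s = init.2 ∧ lexLt s init.1) := by
    intro s _ ⟨h1, _⟩
    have h2 := score_ge edges s
    rw [hinit] at h1
    dsimp only at h1
    omega
  have hAmem := g_mem edges S init
  have hAge := g_ge edges S init pairwise_S hAH
  -- B's result
  set V := votesD edges with hV
  set bc : (Int × Int) × Int := V.items.foldl selStep (((-30 : Int), (-30 : Int)), (0 : Int)) with hbc
  have hBmem := sel_mem V.items (((-30 : Int), (-30 : Int)), (0 : Int))
  have hBge := sel_ge V.items (((-30 : Int), (-30 : Int)), (0 : Int))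
  have hitems : V.items = V.keys.map (fun k => (k, V.getD k 0)) :=
    PySem.Dict.items_eq_map_keys V (votes_nodup edges) 0
  -- every item is (k, hitN k) with k ∈ S
  have hitem_char : ∀ p ∈ V.items, p = (p.1, (hitN edges p.1 : Int)) ∧ p.1 ∈ S := by
    intro p hp
    rw [hitems] at hp
    obtain ⟨k, hk, rfl⟩ := List.mem_map.1 hp
    have hrange := votes_keys_range edges k hk
    have hgd := votes_getD edges k hrange
    constructor
    · dsimp only; rw [hgd]
    · dsimp only; exact (mem_S k).2 hrange
  have hbc2 : 0 ≤ bc.2 := by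
    rcases List.mem_cons.1 hBmem with h | h
    · rw [← hbc] at h; rw [h]
    · obtain ⟨hpe, _⟩ := hitem_char _ h
      rw [← hbc] at hpe
      rw [hpe]
      exact Int.natCast_nonneg _
  -- the two results as comparable pairs
  set phibc : (Int × Int) × Int := (bc.1, 11 * bc.2 - (edges.length : Int)) with hphibc
  -- claim 1: phibc is not beaten by rA's candidate
  have hclaim1 : beatsB phibc rA = false := by
    rcases List.mem_cons.1 hBmem with h | h
    · -- bc is the initial ((-30,-30), 0)
      rw [← hbc] at h
      have hm30 : ((-30 : Int), (-30 : Int)) ∈ S := (mem_S _).2 (by norm_num)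
      have hx : (((-30 : Int), (-30 : Int)), score edges ((-30 : Int), (-30 : Int))) ∈ init :: S.map (fun s => (s, score edges s)) := by
        right; exact List.mem_map.2 ⟨_, hm30, rfl⟩
      have h1 := hAge _ hx
      rw [hphibc, h]
      have hxx : ((((-30 : Int), (-30 : Int)), (0 : Int)).1, 11 * ((((-30 : Int), (-30 : Int)), (0 : Int)) : (Int × Int) × Int).2 - (edges.length : Int)) = ((((-30 : Int), (-30 : Int))), 11 * (0 : Int) - (edges.length : Int)) := rfl
      rw [hxx]
      refine beats_lower h1 ?_
      have := score_ge edges ((-30 : Int), (-30 : Int))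
      omega
    · obtain ⟨hpe, hmem⟩ := hitem_char _ h
      rw [← hbc] at hpe hmem
      have hx : (bc.1, score edges bc.1) ∈ init :: S.map (fun s => (s, score edges s)) := by
        right; exact List.mem_map.2 ⟨_, hmem, rfl⟩
      have h1 := hAge _ hx
      rw [hphibc]
      have : 11 * bc.2 - (edges.length : Int) = score edges bc.1 := by
        rw [score_eq]
        have : bc.2 = (hitN edges bc.1 : Int) := by
          conv_lhs => rw [hpe]
        omega
      rw [this]
      exact h1
  -- claim 2: rA is not beaten by phibc
  have hclaim2 : beatsB rA phibc = false := by
    rcases List.mem_cons.1 hAmem with h | h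
    · -- rA = init
      rw [← hrA] at h
      rw [h, hinit, hphibc]
      simp only [beatsB, decide_eq_false_iff_not]
      omega
    · rw [← hrA] at h
      obtain ⟨s, hsS, hse⟩ := List.mem_map.1 h
      by_cases hk : s ∈ V.keys
      · have hpitem : (s, V.getD s 0) ∈ V.items := by
          rw [hitems]; exact List.mem_map.2 ⟨s, hk, rfl⟩
        have h1 := hBge _ (List.mem_cons_of_mem _ hpitem)
        have hgd := votes_getD edges s ((mem_S s).1 hsS)
        have h2 : beatsB ((s, V.getD s 0).1, 11 * (s, V.getD s 0).2 - (edges.length : Int)) (bc.1, 11 * bc.2 - (edges.length : Int)) = false := by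
          rw [beats_phi]
          exact h1
        rw [← hse, hphibc]
        have h3 : (s, score edges s) = ((s, V.getD s 0).1, 11 * (s, V.getD s 0).2 - (edges.length : Int)) := by
          dsimp only
          rw [hgd, score_eq]
        rw [h3]
        exact h2
      · -- s is not a key: hitN s = 0, score = -n
        have hgd := votes_getD edges s ((mem_S s).1 hsS)
        have hnotc : V.contains s = false := by
          cases hcc : V.contains s with
          | false => rfl
          | true => exact absurd ((PySem.Dict.contains_iff_mem_keys _ _).1 hcc) hk
        have hz : V.getD s 0 = 0 := PySem.Dict.getD_of_not_contains _ _ hnotc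
        have hhit : (hitN edges s : Int) = 0 := by rw [← hgd, hz]
        have hscore : score edges s = -(edges.length : Int) := by
          rw [score_eq]; omega
        have h1 := hBge _ (List.mem_cons_self)
        have h2 : beatsB ((((-30 : Int), (-30 : Int)), (0 : Int)).1, 11 * (((-30 : Int), (-30 : Int)), (0 : Int)).2 - (edges.length : Int)) phibc = false := by
          rw [hphibc, beats_phi]
          exact h1
        have h3 : beatsB (((-30 : Int), (-30 : Int)), -(edges.length : Int)) phibc = false := by
          have heq : ((((-30 : Int), (-30 : Int)), (0 : Int)).1, 11 * (((-30 : Int), (-30 : Int)), (0 : Int)).2 - (edges.length : Int)) = (((-30 : Int), (-30 : Int)), -(edges.length : Int)) := by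
            dsimp only
            norm_num
          rw [heq] at h2
          exact h2
      
        have hrange := (mem_S s).1 hsS
        refine beats_corner h3 ?_ ?_ ?_
        · rw [← hse]; dsimp only; omega
        · rw [← hse]; dsimp only; omega
        · rw [← hse]; dsimp only; omega
  have hfinal : rA = phibc := beats_total hclaim2 hclaim1
  rw [portA_char, portB_char]
  rw [← hrA, ← hV, ← hbc, hfinal, hphibc]
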